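-- pv_equiv track=rewrite | github.com/DanniTheAsian/discrete-math | Logic/truthtable.py | space_format
-- ===== SOURCE A (Python) =====
-- def space_format(expression: str) -> str:
--     spaced = ""
--     for char in expression:
--         if char == "(":
--             spaced += char + " "
--         elif char == "-":
--             spaced += "not "
--         elif char == ")":
--             spaced += " " + char
--         else:
--             spaced += char
--     return spaced
-- ===== SOURCE B (Python) =====
-- def space_format(expression: str) -> str:
--     repl = {"(": "( ", "-": "not ", ")": " )"}
--     pieces = []
--     start = 0
--     for i, ch in enumerate(expression):
--         if ch in repl:
--             pieces.append(expression[start:i])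
--             pieces.append(repl[ch])
--             start = i + 1
--     pieces.append(expression[start:])
--     return "".join(pieces)
-- ===== Notes on version B (the rewrite author's own statement) =====
-- stated objective: alternative
-- what changed: Instead of A's per-character branch chain appending to a growing string, B scans for delimiter positions only, copies the untouched runs between them as whole slices into a piece list, and joins once at the end; the replacement texts come from a dict built once, so the if/elif chain disappears.
import Mathlib
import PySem

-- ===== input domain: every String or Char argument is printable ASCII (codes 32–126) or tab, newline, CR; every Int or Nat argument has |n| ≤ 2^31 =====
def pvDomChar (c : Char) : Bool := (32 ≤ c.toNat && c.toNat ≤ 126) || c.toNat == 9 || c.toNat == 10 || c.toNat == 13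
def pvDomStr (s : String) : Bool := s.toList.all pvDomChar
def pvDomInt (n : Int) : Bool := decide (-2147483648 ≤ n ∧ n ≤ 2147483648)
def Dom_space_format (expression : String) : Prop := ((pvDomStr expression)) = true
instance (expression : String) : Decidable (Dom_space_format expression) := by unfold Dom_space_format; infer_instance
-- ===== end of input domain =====

-- B replaces A's per-character branch-and-append loop by a segment scan: it records only the
-- positions of '(', '-', ')', copies the unchanged runs between them as whole slices into a
-- piece list (replacements from a dict) and joins once at the end (alternative decomposition).

-- ===== PORT A =====
-- literal port of A's character loop: accumulate the output left to right
def space_format (expression : String) : String :=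
  String.ofList (expression.toList.foldl (fun spaced char =>
    if char == '(' then spaced ++ [char, ' ']
    else if char == '-' then spaced ++ ['n', 'o', 't', ' ']
    else if char == ')' then spaced ++ [' ', char]
    else spaced ++ [char]) [])

-- ===== PORT B =====
-- repl = {"(": "( ", "-": "not ", ")": " )"}
def pvRepl : PySem.Dict Char String :=
  PySem.Dict.ofList [('(', "( "), ('-', "not "), (')', " )")]

-- the loop body: 'if ch in repl: pieces += [expression[start:i], repl[ch]]; start = i + 1'
def pvStep (expression : String) (st : List String × Int) (p : Int × Char) : List String × Int :=
  match PySem.Dict.get? pvRepl p.2 with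
  | some r => (st.1 ++ [PySem.Str.slice expression (some st.2) (some p.1), r], p.1 + 1)
  | none => st

def space_format_alt (expression : String) : String :=
  let st := (PySem.List.enumerate expression.toList 0).foldl (pvStep expression) ([], 0)
  PySem.Str.join "" (st.1 ++ [PySem.Str.slice expression (some st.2) none])

-- ===== PRECONDITION & SPEC =====
def Spec_space_format (expression : String) (out : String) : Prop := out = space_format_alt expression
instance (expression : String) (out : String) : Decidable (Spec_space_format expression out) := by unfold Spec_space_format; infer_instance

-- ===== CLAIM =====
def Claim_equal_space_format : Prop := ∀ (expression : String), Dom_space_format expression → Spec_space_format expression (space_format expression)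

-- ===== LEMMAS AND PROOFS =====

-- what A emits for one character
def gA (c : Char) : List Char :=
  if c == '(' then [c, ' ']
  else if c == '-' then ['n', 'o', 't', ' ']
  else if c == ')' then [' ', c]
  else [c]

-- A's loop is the flatMap of gA
theorem foldl_spaced (l : List Char) : ∀ (acc : List Char),
    l.foldl (fun spaced char =>
      if char == '(' then spaced ++ [char, ' ']
      else if char == '-' then spaced ++ ['n', 'o', 't', ' ']
      else if char == ')' then spaced ++ [' ', char]
      else spaced ++ [char]) acc = acc ++ l.flatMap gA := by
  induction l with
  | nil => intro acc; simp
  | cons c t ih =>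
    intro acc
    simp only [List.foldl_cons, List.flatMap_cons, ih]
    unfold gA
    split_ifs <;> simp

-- dict lookups of B, character by character
theorem pvRepl_items : pvRepl = PySem.Dict.mk [('(', "( "), ('-', "not "), (')', " )")] := rfl

theorem get?_repl_none (c : Char) (h1 : c ≠ '(') (h2 : c ≠ '-') (h3 : c ≠ ')') :
    PySem.Dict.get? pvRepl c = none := by
  rw [pvRepl_items]
  simp [PySem.Dict.get?_mk_cons, PySem.Dict.get?,
    (beq_eq_false_iff_ne ..).mpr (Ne.symm h1), (beq_eq_false_iff_ne ..).mpr (Ne.symm h2),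
    (beq_eq_false_iff_ne ..).mpr (Ne.symm h3)]

theorem gA_eq_single (c : Char) (h : PySem.Dict.get? pvRepl c = none) : gA c = [c] := by
  by_cases h1 : c = '('
  · subst h1; rw [show PySem.Dict.get? pvRepl '(' = some "( " from rfl] at h; simp at h
  · by_cases h2 : c = '-'
    · subst h2; rw [show PySem.Dict.get? pvRepl '-' = some "not " from rfl] at h; simp at h
    · by_cases h3 : c = ')'
      · subst h3; rw [show PySem.Dict.get? pvRepl ')' = some " )" from rfl] at h; simp at h
      · simp [gA, h1, h2, h3]

theorem gA_eq_toList (c : Char) (r : String) (h : PySem.Dict.get? pvRepl c = some r) :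
    gA c = r.toList := by
  by_cases h1 : c = '('
  · subst h1; rw [show PySem.Dict.get? pvRepl '(' = some "( " from rfl] at h
    simp at h; subst h; rfl
  · by_cases h2 : c = '-'
    · subst h2; rw [show PySem.Dict.get? pvRepl '-' = some "not " from rfl] at h
      simp at h; subst h; rfl
    · by_cases h3 : c = ')'
      · subst h3; rw [show PySem.Dict.get? pvRepl ')' = some " )" from rfl] at h
        simp at h; subst h; rfl
      · rw [get?_repl_none c h1 h2 h3] at h; exact absurd h (by simp)

theorem flatMap_gA_id (l : List Char) (h : ∀ c ∈ l, gA c = [c]) : l.flatMap gA = l := by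
  rw [List.flatMap_congr (fun c hc => h c hc)]
  exact List.flatMap_singleton' l

-- joining char lists on the empty separator is flatten
theorem join_empty_sep (parts : List (List Char)) : PySem.Chars.join [] parts = parts.flatten := by
  induction parts with
  | nil => simp [PySem.Chars.join_nil]
  | cons p ps ih =>
    cases ps with
    | nil => simp [PySem.Chars.join_singleton]
    | cons q qs => rw [PySem.Chars.join_cons_cons, ih]; simp

-- loop invariant of B's segment scan
theorem pvInv (expression : String) (suffix : List Char) :
    ∀ (i : Nat) (pieces : List String) (start : Nat),
    expression.toList.drop i = suffix →
    start ≤ i →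
    (pieces.map String.toList).flatten = (expression.toList.take start).flatMap gA →
    (∀ c ∈ (expression.toList.drop start).take (i - start), gA c = [c]) →
    ∃ (P : List String) (S : Nat),
      (PySem.List.enumerate suffix (i : Int)).foldl (pvStep expression) (pieces, (start : Int))
        = (P, (S : Int)) ∧
      (P.map String.toList).flatten = (expression.toList.take S).flatMap gA ∧
      (∀ c ∈ expression.toList.drop S, gA c = [c]) := by
  induction suffix with
  | nil =>
    intro i pieces start hdrop hle h1 h2
    refine ⟨pieces, start, by simp [PySem.List.enumerate], h1, ?_⟩
    have hlen : expression.toList.length ≤ i := by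
      have h := congrArg List.length hdrop
      rw [List.length_drop] at h
      simp only [List.length_nil] at h; omega
    intro c hc
    apply h2 c
    have hlen2 : (expression.toList.drop start).length ≤ i - start := by
      rw [List.length_drop]; omega
    rw [List.take_of_length_le hlen2]; exact hc
  | cons c rest ih =>
    intro i pieces start hdrop hle h1 h2
    have hi : i < expression.toList.length := by
      by_contra h
      rw [List.drop_of_length_le (by omega)] at hdrop
      simp at hdrop
    have hgi : expression.toList[i] = c := by
      have h0 : (expression.toList.drop i)[0]'(by rw [hdrop]; simp) = c := by
        simp [hdrop]
      rw [List.getElem_drop] at h0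
      simpa using h0
    have hdrop' : expression.toList.drop (i + 1) = rest := by
      have h := congrArg (List.drop 1) hdrop
      simpa [List.drop_drop, Nat.add_comm] using h
    have hgi? : expression.toList[i]? = some c := by
      rw [List.getElem?_eq_getElem hi, hgi]
    rw [PySem.List.enumerate_cons, List.foldl_cons]
    have hcast : ((i : Int) + 1) = ((i + 1 : Nat) : Int) := by push_cast; ring
    rw [hcast]
    cases hget : PySem.Dict.get? pvRepl c with
    | none =>
      have hstep : pvStep expression (pieces, (start : Int)) ((i : Int), c) = (pieces, (start : Int)) := by
        simp [pvStep, hget]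
      rw [hstep]
      apply ih (i + 1) pieces start hdrop' (by omega) h1
      intro d hd
      rw [show i + 1 - start = (i - start) + 1 by omega, List.take_succ] at hd
      rcases List.mem_append.mp hd with hd | hd
      · exact h2 d hd
      · have : (expression.toList.drop start)[i - start]? = some c := by
          rw [List.getElem?_drop, show start + (i - start) = i by omega, hgi?]
        rw [this] at hd
        simp at hd; subst hd
        exact gA_eq_single d hget
    | some r =>
      have hstep : pvStep expression (pieces, (start : Int)) ((i : Int), c)
          = (pieces ++ [PySem.Str.slice expression (some (start : Int)) (some (i : Int)), r],
             (i : Int) + 1) := by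
        simp [pvStep, hget]
      rw [hstep, hcast]
      apply ih (i + 1) _ (i + 1) hdrop' le_rfl ?_ (by simp)
      -- flatten of the new pieces = flatMap gA of the first i+1 characters
      have hseg : (expression.toList.drop start).take (i - start)
          = (PySem.Str.slice expression (some (start : Int)) (some (i : Int))).toList := by
        rw [PySem.Str.toList_slice, PySem.Chars.slice_eq_listSlice, PySem.List.slice_natCast]
      have htake1 : expression.toList.take i
          = expression.toList.take start ++ (expression.toList.drop start).take (i - start) := by
        rw [show i = start + (i - start) by omega, List.take_add]
        congr 1 <;> simp [Nat.add_sub_cancel_left] <;> omega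
      have htake2 : expression.toList.take (i + 1) = expression.toList.take i ++ [c] := by
        rw [List.take_succ, hgi?]; rfl
      rw [htake2, htake1]
      simp only [List.map_append, List.flatten_append, List.flatMap_append, h1,
        List.map_cons, List.map_nil, List.flatten_cons, List.flatten_nil,
        List.flatMap_cons, List.flatMap_nil, List.append_nil]
      rw [flatMap_gA_id _ h2, ← hseg, gA_eq_toList c r hget]
      simp
-- ===== VERDICT =====
theorem space_format_spec : Claim_equal_space_format := by
  intro expression _
  unfold Spec_space_format space_format space_format_alt
  obtain ⟨P, S, hfold, hflat, hrest⟩ :=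
    pvInv expression expression.toList 0 [] 0 (by simp) le_rfl (by simp) (by simp)
  show String.ofList _ = _
  rw [show ((0 : Int)) = ((0 : Nat) : Int) from rfl, hfold]
  apply String.ext
  rw [PySem.Str.toList_join]
  simp only [String.toList_ofList, foldl_spaced, List.nil_append, List.map_append,
    List.map_cons, List.map_nil]
  rw [show ("" : String).toList = [] from rfl, join_empty_sep, List.flatten_append]
  simp only [List.flatten_cons, List.flatten_nil, List.append_nil]
  rw [hflat, PySem.Str.toList_slice, PySem.Chars.slice_eq_listSlice, PySem.List.slice_from_natCast,
      ← flatMap_gA_id _ hrest, ← List.flatMap_append, List.take_append_drop]
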